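-- pv_equiv track=rewrite | github.com/erdmgclr/Tokibecayis | tokibecayis/app.py | _convert_qmarks_to_psycopg
-- ===== SOURCE A (Python) =====
-- def _convert_qmarks_to_psycopg(sql: str) -> str:
--     """Convert SQLite-style ? placeholders to psycopg2 %s placeholders.
--     Avoids touching question marks inside quoted strings.
--     """
--     out = []
--     in_single = False
--     in_double = False
--     esc = False
--     for ch in sql:
--         if esc:
--             out.append(ch)
--             esc = False
--             continue
--         if ch == "\\":  # escape next char
--             out.append(ch)
--             esc = True
--             continue
--         if ch == "'" and not in_double:
--             in_single = not in_single
--             out.append(ch)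
--             continue
--         if ch == '"' and not in_single:
--             in_double = not in_double
--             out.append(ch)
--             continue
--         if ch == "?" and not in_single and not in_double:
--             out.append("%s")
--         else:
--             out.append(ch)
--     return "".join(out)
-- ===== SOURCE B (Python) =====
-- def _convert_qmarks_to_psycopg(sql: str) -> str:
--     """Tokenizing rewrite: consume escape pairs and whole quoted runs at once,
--     replace only bare ? placeholders with %s."""
--     out = []
--     i = 0
--     n = len(sql)
--     while i < n:
--         ch = sql[i]
--         if ch == "\\":
--             out.append(sql[i:i + 2])
--             i += 2
--         elif ch == "'" or ch == '"':
--             j = i + 1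
--             while j < n and sql[j] != ch:
--                 j += 2 if sql[j] == "\\" else 1
--             j = min(j + 1, n)
--             out.append(sql[i:j])
--             i = j
--         elif ch == "?":
--             out.append("%s")
--             i += 1
--         else:
--             out.append(ch)
--             i += 1
--     return "".join(out)
-- ===== Notes on version B (the rewrite author's own statement) =====
-- stated objective: simpler
-- what changed: Replaces A's per-character state machine with four boolean flags (in_single/in_double/esc) by a stateless single-pass tokenizer that consumes backslash-escape pairs and whole quoted runs in one step and rewrites only bare ? to %s.
import Mathlib
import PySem

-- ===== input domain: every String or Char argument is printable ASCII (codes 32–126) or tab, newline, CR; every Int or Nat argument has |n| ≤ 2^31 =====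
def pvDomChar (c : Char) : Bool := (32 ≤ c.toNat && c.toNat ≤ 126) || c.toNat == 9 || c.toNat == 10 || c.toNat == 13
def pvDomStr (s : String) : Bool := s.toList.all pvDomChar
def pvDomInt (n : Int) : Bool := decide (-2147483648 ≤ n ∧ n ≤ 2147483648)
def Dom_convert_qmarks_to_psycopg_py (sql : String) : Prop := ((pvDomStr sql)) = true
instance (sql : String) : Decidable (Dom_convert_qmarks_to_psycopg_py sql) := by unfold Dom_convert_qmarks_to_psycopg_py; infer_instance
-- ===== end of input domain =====

-- B replaces A's per-character four-flag state machine by a single-pass tokenizer that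
-- consumes backslash pairs and whole quoted runs at once (objective: simpler; same O(n) cost).

-- ===== PORT A =====
-- state = (out, in_single, in_double, esc); one step of A's for-loop body
def aStep : (List Char × Bool × Bool × Bool) → Char → (List Char × Bool × Bool × Bool)
  | (out, s, d, e), ch =>
    if e then (out ++ [ch], s, d, false)
    else if ch = '\\' then (out ++ [ch], s, d, true)
    else if ch = '\'' ∧ d = false then (out ++ [ch], !s, d, false)
    else if ch = '"' ∧ s = false then (out ++ [ch], s, !d, false)
    else if ch = '?' ∧ s = false ∧ d = false then (out ++ ['%', 's'], s, d, false)
    else (out ++ [ch], s, d, false)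

def convert_qmarks_to_psycopg_py (sql : String) : String :=
  String.ofList ((sql.toList.foldl aStep ([], false, false, false)).1)

-- ===== PORT B =====
-- inner while loop of Source B: scan forward from j for the unescaped closing quote q
def bFind (s : List Char) (q : Char) (j : Nat) : Nat :=
  if h : j < s.length then
    if s[j] = q then j
    else bFind s q (j + (if s[j] = '\\' then 2 else 1))
  else j
termination_by s.length - j
decreasing_by all_goals (split <;> omega)

theorem bFind_ge (s : List Char) (q : Char) (j : Nat) : j ≤ bFind s q j := by
  fun_induction bFind s q j <;> first | omega | (split_ifs at * <;> omega)

-- outer while loop of Source B, index i over the characters of sql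
def bLoop (s : List Char) (i : Nat) : List Char :=
  if h : i < s.length then
    let ch := s[i]
    if ch = '\\' then (s.drop i).take 2 ++ bLoop s (i + 2)
    else if ch = '\'' ∨ ch = '"' then
      let j := min (bFind s ch (i + 1) + 1) s.length
      (s.drop i).take (j - i) ++ bLoop s j
    else if ch = '?' then '%' :: 's' :: bLoop s (i + 1)
    else ch :: bLoop s (i + 1)
  else []
termination_by s.length - i
decreasing_by
  · omega
  · have := bFind_ge s s[i] (i + 1); omega
  · omega
  · omega

def convert_qmarks_to_psycopg_py_alt (sql : String) : String :=
  String.ofList (bLoop sql.toList 0)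

-- ===== PRECONDITION & SPEC =====
def Spec_convert_qmarks_to_psycopg_py (sql : String) (out : String) : Prop := out = convert_qmarks_to_psycopg_py_alt sql
instance (sql : String) (out : String) : Decidable (Spec_convert_qmarks_to_psycopg_py sql out) := by unfold Spec_convert_qmarks_to_psycopg_py; infer_instance

-- ===== CLAIM (what is proved, stated in full; the proofs are below) =====
def Claim_equal_convert_qmarks_to_psycopg_py : Prop := ∀ (sql : String), Dom_convert_qmarks_to_psycopg_py sql → Spec_convert_qmarks_to_psycopg_py sql (convert_qmarks_to_psycopg_py sql)

-- ===== LEMMAS AND PROOFS =====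

-- combined invariant: from the normal state the fold computes bLoop;
-- from the inside-a-quote state it copies the quoted run (up to bFind's endpoint) verbatim
theorem bLoop_nil (s : List Char) (i : Nat) (h : s.length ≤ i) : bLoop s i = [] := by
  rw [bLoop]; simp [Nat.not_lt.mpr h]

theorem pv_base (s : List Char) (i : Nat) (h : s.length ≤ i) :
    (∀ acc, (List.foldl aStep (acc, false, false, false) (s.drop i)).1 = acc ++ bLoop s i) ∧
    (∀ q, (q = '\'' ∨ q = '"') → ∀ acc,
      (List.foldl aStep (acc, decide (q = '\''), decide (q = '"'), false) (s.drop i)).1 =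
        acc ++ (s.drop i).take (min (bFind s q i + 1) s.length - i)
            ++ bLoop s (min (bFind s q i + 1) s.length)) := by
  have hd : s.drop i = [] := List.drop_eq_nil_of_le h
  constructor
  · intro acc; rw [hd, bLoop_nil s i h]; simp
  · intro q hq acc
    rw [hd]
    rw [bFind]; simp only [Nat.not_lt.mpr h, dite_false]
    rw [show min (i + 1) s.length = s.length from by omega, bLoop_nil s s.length (le_refl _)]
    simp

theorem pv_main (s : List Char) (k : Nat) : ∀ i, s.length - i ≤ k →
    (∀ acc, (List.foldl aStep (acc, false, false, false) (s.drop i)).1 = acc ++ bLoop s i) ∧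
    (∀ q, (q = '\'' ∨ q = '"') → ∀ acc,
      (List.foldl aStep (acc, decide (q = '\''), decide (q = '"'), false) (s.drop i)).1 =
        acc ++ (s.drop i).take (min (bFind s q i + 1) s.length - i)
            ++ bLoop s (min (bFind s q i + 1) s.length)) := by
  induction k with
  | zero =>
    intro i hk
    exact pv_base s i (by omega)
  | succ k ih =>
    intro i hk
    by_cases h : i < s.length
    case neg =>
      exact pv_base s i (by omega)
    case pos =>
    have hdrop : s.drop i = s[i] :: s.drop (i + 1) := List.drop_eq_getElem_cons h
    constructor
    · -- normal state
      intro acc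
      rw [hdrop, List.foldl_cons]
      by_cases hb : s[i] = '\\'
      · have hstep : aStep (acc, false, false, false) s[i] = (acc ++ [s[i]], false, false, true) := by
          simp [aStep, hb]
        have hB : bLoop s i = (s[i] :: s.drop (i + 1)).take 2 ++ bLoop s (i + 2) := by
          rw [bLoop]; simp only [dif_pos h, if_pos hb]; rw [hdrop]
        rw [hstep, hB]
        by_cases h2 : i + 1 < s.length
        · have hdrop2 : s.drop (i + 1) = s[i + 1] :: s.drop (i + 2) := List.drop_eq_getElem_cons h2
          rw [hdrop2, List.foldl_cons]
          have hstep2 : aStep (acc ++ [s[i]], false, false, true) s[i + 1]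
              = (acc ++ [s[i]] ++ [s[i + 1]], false, false, false) := by simp [aStep]
          rw [hstep2, (ih (i + 2) (by omega)).1,
            show List.take 2 (s[i] :: s[i + 1] :: List.drop (i + 2) s) = [s[i], s[i + 1]] from rfl]
          simp
        · have hd2 : s.drop (i + 1) = [] := List.drop_eq_nil_of_le (by omega)
          rw [hd2, bLoop_nil s (i + 2) (by omega),
            show List.take 2 [s[i]] = [s[i]] from rfl]
          simp
      · by_cases hq : s[i] = '\'' ∨ s[i] = '"'
        · have hstep : aStep (acc, false, false, false) s[i]
              = (acc ++ [s[i]], decide (s[i] = '\''), decide (s[i] = '"'), false) := by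
            rcases hq with hq' | hq' <;> simp [aStep, hq']
          have hB : bLoop s i = (s[i] :: s.drop (i + 1)).take
                (min (bFind s s[i] (i + 1) + 1) s.length - i)
              ++ bLoop s (min (bFind s s[i] (i + 1) + 1) s.length) := by
            rw [bLoop]; simp only [dif_pos h, if_neg hb, if_pos hq]; rw [hdrop]
          rw [hstep, hB, (ih (i + 1) (by omega)).2 s[i] hq (acc ++ [s[i]])]
          have hge : i + 1 ≤ bFind s s[i] (i + 1) := bFind_ge s s[i] (i + 1)
          rw [show min (bFind s s[i] (i + 1) + 1) s.length - i
              = (min (bFind s s[i] (i + 1) + 1) s.length - (i + 1)) + 1 from by omega,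
            List.take_succ_cons]
          simp
        · rw [not_or] at hq
          have hstep : aStep (acc, false, false, false) s[i]
              = (acc ++ (if s[i] = '?' then ['%', 's'] else [s[i]]), false, false, false) := by
            by_cases hqm : s[i] = '?' <;> simp [aStep, hb, hq.1, hq.2, hqm]
          have hB : bLoop s i = (if s[i] = '?' then ['%', 's'] else [s[i]]) ++ bLoop s (i + 1) := by
            rw [bLoop]
            simp only [dif_pos h, if_neg hb, if_neg (show ¬(s[i] = '\'' ∨ s[i] = '"') from by
              rintro (hc | hc) <;> [exact hq.1 hc; exact hq.2 hc])]
            by_cases hqm : s[i] = '?' <;> simp [hqm]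
          rw [hstep, hB, (ih (i + 1) (by omega)).1]
          simp
    · -- inside a quoted run headed by q
      intro q hq acc
      rw [hdrop, List.foldl_cons]
      have hqb : q ≠ '\\' := by rcases hq with rfl | rfl <;> decide
      by_cases hb : s[i] = '\\'
      · -- escaped character inside the quotes
        have hne : ¬ s[i] = q := by rw [hb]; exact fun hc => hqb hc.symm
        have hne2 : ¬('\\' = q) := fun hc => hqb hc.symm
        have hbf : bFind s q i = bFind s q (i + 2) := by
          rw [bFind]; simp [h, hb, hne2]
        have hstep : aStep (acc, decide (q = '\''), decide (q = '"'), false) s[i]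
            = (acc ++ [s[i]], decide (q = '\''), decide (q = '"'), true) := by
          simp [aStep, hb]
        rw [hstep, hbf]
        by_cases h2 : i + 1 < s.length
        · have hdrop2 : s.drop (i + 1) = s[i + 1] :: s.drop (i + 2) := List.drop_eq_getElem_cons h2
          rw [hdrop2, List.foldl_cons]
          have hstep2 : aStep (acc ++ [s[i]], decide (q = '\''), decide (q = '"'), true) s[i + 1]
              = (acc ++ [s[i]] ++ [s[i + 1]], decide (q = '\''), decide (q = '"'), false) := by
            simp [aStep]
          rw [hstep2, (ih (i + 2) (by omega)).2 q hq]
          have hge : i + 2 ≤ bFind s q (i + 2) := bFind_ge s q (i + 2)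
          rw [show min (bFind s q (i + 2) + 1) s.length - i
              = ((min (bFind s q (i + 2) + 1) s.length - (i + 2)) + 1) + 1 from by omega,
            List.take_succ_cons, List.take_succ_cons]
          simp
        · have hd2 : s.drop (i + 1) = [] := List.drop_eq_nil_of_le (by omega)
          have hbf2 : bFind s q (i + 2) = i + 2 := by
            rw [bFind]; simp [Nat.not_lt.mpr (show s.length ≤ i + 2 from by omega)]
          rw [hd2, hbf2, show min (i + 2 + 1) s.length = s.length from by omega,
            bLoop_nil s s.length (le_refl _), show s.length - i = 1 from by omega]
          simp
      · by_cases hcq : s[i] = q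
        · -- closing quote: back to normal state
          have hbf : bFind s q i = i := by rw [bFind]; simp [h, hcq]
          have hstep : aStep (acc, decide (q = '\''), decide (q = '"'), false) s[i]
              = (acc ++ [s[i]], false, false, false) := by
            rcases hq with rfl | rfl <;> simp [aStep, hcq]
          rw [hstep, (ih (i + 1) (by omega)).1, hbf,
            show min (i + 1) s.length = i + 1 from by omega, show i + 1 - i = 1 from by omega]
          simp [hcq]
        · -- ordinary character inside the quotes
          have hbf : bFind s q i = bFind s q (i + 1) := by
            rw [bFind]; simp [h, hcq, hb]
          have hstep : aStep (acc, decide (q = '\''), decide (q = '"'), false) s[i]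
              = (acc ++ [s[i]], decide (q = '\''), decide (q = '"'), false) := by
            rcases hq with rfl | rfl <;> simp [aStep, hb, hcq]
          rw [hstep, (ih (i + 1) (by omega)).2 q hq, hbf]
          have hge : i + 1 ≤ bFind s q (i + 1) := bFind_ge s q (i + 1)
          rw [show min (bFind s q (i + 1) + 1) s.length - i
              = (min (bFind s q (i + 1) + 1) s.length - (i + 1)) + 1 from by omega,
            List.take_succ_cons]
          simp

-- ===== VERDICT (by name: the statement is the Claim_ definition above) =====
theorem convert_qmarks_to_psycopg_py_spec : Claim_equal_convert_qmarks_to_psycopg_py := by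
  intro sql _
  unfold Spec_convert_qmarks_to_psycopg_py convert_qmarks_to_psycopg_py convert_qmarks_to_psycopg_py_alt
  have := (pv_main sql.toList sql.toList.length 0 (by omega)).1 []
  simp only [List.drop_zero] at this
  rw [this]; rfl
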